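-- pv_equiv track=rewrite | github.com/CauanS29/Python | questionario07/multiplos.py | ehMultiplos
-- ===== SOURCE A (Python) =====
-- def ehMultiplos(numero1, numero2):
--     cont = 1
--     totalMultiplos = 0
--     while cont < 50:
--         if cont % numero1 == 0 and cont % numero2 == 0:
--            totalMultiplos += 1
--         cont += 1
--     return totalMultiplos
-- ===== SOURCE B (Python) =====
-- def ehMultiplos(numero1, numero2):
--     a = abs(numero1)
--     b = abs(numero2)
--     while b:
--         a, b = b, a % b
--     lcm = abs(numero1 * numero2) // a
--     return 49 // lcm
-- ===== Notes on version B (the rewrite author's own statement) =====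
-- stated objective: simpler
-- what changed: Replaces the fixed 1..49 modulo scan with a closed form: compute gcd by Euclid's algorithm, form lcm = |n1*n2|//gcd, and return 49 // lcm.
-- outside the precondition, e.g. on ehMultiplos(60, 0): A returns 0, B raises ZeroDivisionError; on ehMultiplos(0, 3): A raises ZeroDivisionError, B raises ZeroDivisionError
import Mathlib
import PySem

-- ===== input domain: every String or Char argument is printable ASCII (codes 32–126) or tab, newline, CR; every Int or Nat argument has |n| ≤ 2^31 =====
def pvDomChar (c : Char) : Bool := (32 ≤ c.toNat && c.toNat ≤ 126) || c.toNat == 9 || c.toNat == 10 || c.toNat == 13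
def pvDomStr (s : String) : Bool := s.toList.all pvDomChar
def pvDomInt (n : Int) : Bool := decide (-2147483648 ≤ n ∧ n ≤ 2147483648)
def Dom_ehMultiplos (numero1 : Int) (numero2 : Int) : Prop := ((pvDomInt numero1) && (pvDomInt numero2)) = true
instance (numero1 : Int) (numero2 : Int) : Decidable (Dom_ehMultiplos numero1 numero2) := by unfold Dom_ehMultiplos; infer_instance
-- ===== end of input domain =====

-- B replaces A's fixed 1..49 modulo scan with the closed form 49 // lcm(n1, n2) (gcd by Euclid): simpler, no loop over candidates.

-- ===== PORT A =====
def ehMultiplos (numero1 : Int) (numero2 : Int) : Int :=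
  (PySem.List.pyRange 1 50 1).foldl
    (fun totalMultiplos cont =>
      if PySem.Int.mod cont numero1 == 0 && PySem.Int.mod cont numero2 == 0
      then totalMultiplos + 1 else totalMultiplos) 0

-- ===== PORT B =====
-- Euclid's while loop 'while b: a, b = b, a % b' from Source B as structural recursion
def pvEuclid (a b : Nat) : Nat :=
  if h : b = 0 then a else pvEuclid b (a % b)
termination_by b
decreasing_by exact Nat.mod_lt _ (Nat.pos_of_ne_zero h)

def ehMultiplos_alt (numero1 : Int) (numero2 : Int) : Int :=
  PySem.Int.floordiv 49
    (PySem.Int.floordiv (((numero1 * numero2).natAbs : Nat) : Int)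
      ((pvEuclid numero1.natAbs numero2.natAbs : Nat) : Int))

-- ===== PRECONDITION & SPEC =====
-- Pre_ excludes zero arguments: A raises ZeroDivisionError there, except that when numero2 = 0 and
-- |numero1| > 49 short-circuiting of 'and' accidentally lets A return 0; B raises on every zero argument.
def Pre_ehMultiplos (numero1 : Int) (numero2 : Int) : Prop := numero1 ≠ 0 ∧ numero2 ≠ 0
instance (numero1 : Int) (numero2 : Int) : Decidable (Pre_ehMultiplos numero1 numero2) := by unfold Pre_ehMultiplos; infer_instance
def pvWitness_ehMultiplos : Int × Int := (6, 4)

def Spec_ehMultiplos (numero1 : Int) (numero2 : Int) (out : Int) : Prop := out = ehMultiplos_alt numero1 numero2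
instance (numero1 : Int) (numero2 : Int) (out : Int) : Decidable (Spec_ehMultiplos numero1 numero2 out) := by unfold Spec_ehMultiplos; infer_instance

-- ===== CLAIM (what is proved, stated in full; the proofs are below) =====
def Claim_equal_ehMultiplos : Prop := ∀ (numero1 : Int) (numero2 : Int), Dom_ehMultiplos numero1 numero2 → Pre_ehMultiplos numero1 numero2 → Spec_ehMultiplos numero1 numero2 (ehMultiplos numero1 numero2)

-- ===== LEMMAS AND PROOFS =====

lemma pvEuclid_eq_gcd (a b : Nat) : pvEuclid a b = Nat.gcd a b := by
  induction b using Nat.strong_induction_on generalizing a with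
  | _ b ih =>
    unfold pvEuclid
    split
    · simp [*]
    · rename_i h
      rw [ih (a % b) (Nat.mod_lt _ (Nat.pos_of_ne_zero h)) b,
        Nat.gcd_comm b, ← Nat.gcd_rec, Nat.gcd_comm]

lemma pv_dvd_lcm_iff (n1 n2 c : Int) :
    ((Nat.lcm n1.natAbs n2.natAbs : Int) ∣ c) ↔ (n1 ∣ c ∧ n2 ∣ c) := by
  rw [Int.natCast_dvd, Nat.lcm_dvd_iff, Int.natAbs_dvd_natAbs, Int.natAbs_dvd_natAbs]

lemma pv_countP_range_dvd (L n : Nat) :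
    (List.range n).countP (fun k => decide (L ∣ (k + 1))) = n / L := by
  induction n with
  | zero => simp
  | succ n ih =>
    rw [List.range_succ, List.countP_append, ih, Nat.succ_div]
    simp [List.countP_cons]

theorem ehMultiplos_spec : Claim_equal_ehMultiplos := by
  intro n1 n2 _ _
  unfold Spec_ehMultiplos ehMultiplos ehMultiplos_alt
  have hL : (n1 * n2).natAbs / pvEuclid n1.natAbs n2.natAbs = Nat.lcm n1.natAbs n2.natAbs := by
    rw [pvEuclid_eq_gcd, Int.natAbs_mul]; rfl
  rw [PySem.Int.floordiv_natCast, hL,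
    show (49 : Int) = ((49 : Nat) : Int) from rfl, PySem.Int.floordiv_natCast]
  rw [PySem.List.foldl_count_if
      (fun cont => PySem.Int.mod cont n1 == 0 && PySem.Int.mod cont n2 == 0)]
  rw [show PySem.List.pyRange 1 50 1 = PySem.List.pyRange 1 50 from rfl,
    PySem.List.pyRange_one, List.countP_map]
  have hfun : ((fun cont => PySem.Int.mod cont n1 == 0 && PySem.Int.mod cont n2 == 0) ∘
      fun k : Nat => (1 : Int) + (k : Int))
      = fun k : Nat => decide (Nat.lcm n1.natAbs n2.natAbs ∣ (k + 1)) := by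
    funext k
    rw [Bool.eq_iff_iff]
    simp only [Function.comp_apply, Bool.and_eq_true, beq_iff_eq, decide_eq_true_eq,
      PySem.Int.mod_eq_zero_iff_dvd]
    rw [← pv_dvd_lcm_iff n1 n2,
      show (1 + (k : Int)) = (((k + 1 : Nat) : Int)) from by push_cast; ring]
    exact Int.natCast_dvd_natCast
  rw [hfun, pv_countP_range_dvd]
  norm_num

-- ===== VERDICT (by name: the statement is the Claim_ definition above) =====
-- (the theorem ehMultiplos_spec above proves Claim_equal_ehMultiplos)
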